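-- pv_equiv track=rewrite | github.com/InesBlanco4/PP_programacion1_InesBlanco | funciones.py | maxima_cantidad_por_juguete_sin_metodos
-- ===== SOURCE A (Python) =====
-- def maxima_cantidad_por_juguete_sin_metodos(existencias):
--     max_cantidades = []
--
--     for juguete in existencias:
--         provincia, tipo_juguete, cantidad = juguete[0], juguete[1], juguete[2]
--         encontrado = False
--
--         for i in range(len(max_cantidades)):
--             if max_cantidades[i][0] == tipo_juguete:
--                 encontrado = True
--                 if cantidad > max_cantidades[i][2]:
--                     max_cantidades[i] = [tipo_juguete, provincia, cantidad]
--                 break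
--
--         if not encontrado:
--             max_cantidades += [[tipo_juguete, provincia, cantidad]]
--
--     return max_cantidades
-- ===== SOURCE B (Python) =====
-- def maxima_cantidad_por_juguete_sin_metodos(existencias):
--     # Phase 1: group records by toy type (dict keeps first-appearance order).
--     grupos = {}
--     for registro in existencias:
--         provincia, tipo_juguete, cantidad = registro[0], registro[1], registro[2]
--         grupos[tipo_juguete] = grupos.get(tipo_juguete, []) + [(provincia, cantidad)]
--     # Phase 2: for each type pick the first record with maximal cantidad.
--     resultado = []
--     for tipo_juguete, grupo in grupos.items():
--         mejor = max(grupo, key=lambda r: r[1])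
--         resultado += [[tipo_juguete, mejor[0], mejor[1]]]
--     return resultado
-- ===== Notes on version B (the rewrite author's own statement) =====
-- stated objective: alternative
-- what changed: A keeps a running result and rescans it linearly for each record, updating the max in place; B is a two-phase group-then-reduce: it first groups all records by toy type in an insertion-ordered dict, then picks each group's first maximal record with max(key=...).
import Mathlib
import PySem

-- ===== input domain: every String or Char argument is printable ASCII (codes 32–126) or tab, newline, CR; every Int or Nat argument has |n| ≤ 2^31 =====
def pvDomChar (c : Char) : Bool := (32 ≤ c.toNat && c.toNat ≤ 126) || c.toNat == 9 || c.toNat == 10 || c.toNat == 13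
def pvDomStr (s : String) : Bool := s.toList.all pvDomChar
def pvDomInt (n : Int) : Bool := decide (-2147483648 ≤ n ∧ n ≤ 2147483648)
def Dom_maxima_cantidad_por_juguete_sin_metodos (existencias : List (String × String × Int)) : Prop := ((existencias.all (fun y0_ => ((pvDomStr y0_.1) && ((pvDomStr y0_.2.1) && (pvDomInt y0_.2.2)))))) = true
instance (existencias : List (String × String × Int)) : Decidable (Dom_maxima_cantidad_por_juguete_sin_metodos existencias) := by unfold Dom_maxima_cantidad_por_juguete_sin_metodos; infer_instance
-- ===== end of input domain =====

-- B replaces A's inline linear-scan running-max with a two-phase group-then-reduce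
-- decomposition (group by toy type, then pick each group's first maximal record); objective: alternative.

-- ===== PORT A =====
-- inner 'for i in range(len(max_cantidades)): … break' scan: returns the (possibly
-- updated) list and whether the tipo was found ('encontrado')
def pvScanA (acc : List (String × String × Int)) (provincia tipo_juguete : String)
    (cantidad : Int) : List (String × String × Int) × Bool :=
  match acc with
  | [] => ([], false)
  | e :: rest =>
    if e.1 == tipo_juguete then
      if cantidad > e.2.2 then ((tipo_juguete, provincia, cantidad) :: rest, true)
      else (e :: rest, true)
    else
      let r := pvScanA rest provincia tipo_juguete cantidad
      (e :: r.1, r.2)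

def maxima_cantidad_por_juguete_sin_metodos (existencias : List (String × String × Int)) : List (String × String × Int) :=
  existencias.foldl
    (fun max_cantidades juguete =>
      let provincia := juguete.1
      let tipo_juguete := juguete.2.1
      let cantidad := juguete.2.2
      let r := pvScanA max_cantidades provincia tipo_juguete cantidad
      if r.2 then r.1 else max_cantidades ++ [(tipo_juguete, provincia, cantidad)])
    []

-- ===== PORT B =====
-- phase 1: grupos[tipo] = grupos.get(tipo, []) + [(provincia, cantidad)]
def pvGrupos (existencias : List (String × String × Int)) : PySem.Dict String (List (String × Int)) :=
  existencias.foldl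
    (fun grupos registro =>
      grupos.insert registro.2.1 (grupos.getD registro.2.1 [] ++ [(registro.1, registro.2.2)]))
    PySem.Dict.empty

-- phase 2: max(grupo, key=lambda r: r[1]); every grupo is nonempty, so the
-- .getD default of PySem.List.max? is never used
def maxima_cantidad_por_juguete_sin_metodos_alt (existencias : List (String × String × Int)) : List (String × String × Int) :=
  (pvGrupos existencias).items.foldl
    (fun resultado p =>
      let mejor := (PySem.List.max? p.2 (fun r => r.2)).getD ("", 0)
      resultado ++ [(p.1, mejor.1, mejor.2)])
    []

-- ===== PRECONDITION & SPEC =====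
def Spec_maxima_cantidad_por_juguete_sin_metodos (existencias : List (String × String × Int)) (out : List (String × String × Int)) : Prop := out = maxima_cantidad_por_juguete_sin_metodos_alt existencias
instance (existencias : List (String × String × Int)) (out : List (String × String × Int)) : Decidable (Spec_maxima_cantidad_por_juguete_sin_metodos existencias out) := by unfold Spec_maxima_cantidad_por_juguete_sin_metodos; infer_instance

-- ===== CLAIM (what is proved, stated in full; the proofs are below) =====
def Claim_equal_maxima_cantidad_por_juguete_sin_metodos : Prop := ∀ (existencias : List (String × String × Int)), Dom_maxima_cantidad_por_juguete_sin_metodos existencias → Spec_maxima_cantidad_por_juguete_sin_metodos existencias (maxima_cantidad_por_juguete_sin_metodos existencias)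

-- ===== LEMMAS AND PROOFS =====

-- first maximal element of a group (B's 'mejor')
def pvBest (g : List (String × Int)) : String × Int :=
  (PySem.List.max? g (fun r => r.2)).getD ("", 0)

-- render a grouping as A's state: one (tipo, provincia, cantidad) entry per group
def pvOut (seen : List (String × List (String × Int))) : List (String × String × Int) :=
  seen.map (fun p => (p.1, (pvBest p.2).1, (pvBest p.2).2))

-- add one record to its group, as plain list surgery (mirrors Dict.insert's items)
def pvAddG (seen : List (String × List (String × Int))) (k : String) (x : String × Int) :
    List (String × List (String × Int)) :=
  if k ∈ seen.map (fun p => p.1) then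
    seen.map (fun p => if p.1 == k then (p.1, p.2 ++ [x]) else p)
  else seen ++ [(k, [x])]

lemma pvBest_cons (x : String × Int) (t : List (String × Int)) :
    pvBest (x :: t) = t.foldl (fun m y => if m.2 < y.2 then y else m) x := by
  suffices h : PySem.List.max? (x :: t) (fun r : String × Int => r.2)
      = some (t.foldl (fun m y => if m.2 < y.2 then y else m) x) by
    simp [pvBest, h]
  induction t generalizing x with
  | nil => rfl
  | cons y t ih =>
    have h1 := ih (if x.2 < y.2 then y else x)
    simp only [PySem.List.max?, List.foldl_cons] at h1 ⊢
    split at h1 <;> split <;> simp_all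

lemma pvBest_append (x y : String × Int) (t : List (String × Int)) :
    pvBest ((x :: t) ++ [y]) = if (pvBest (x :: t)).2 < y.2 then y else pvBest (x :: t) := by
  simp [pvBest_cons]

lemma pvBest_single (x : String × Int) : pvBest [x] = x := rfl

lemma pvScanA_not_found (seen : List (String × List (String × Int)))
    (prov tipo : String) (cant : Int) (h : ∀ q ∈ seen, q.1 ≠ tipo) :
    pvScanA (pvOut seen) prov tipo cant = (pvOut seen, false) := by
  induction seen with
  | nil => rfl
  | cons p rest ih =>
    have h1 : (p.1 == tipo) = false := by
      simp only [beq_eq_false_iff_ne]; exact h p (by simp)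
    have ih' := ih (fun q hq => h q (List.mem_cons_of_mem _ hq))
    simp only [pvOut, List.map_cons] at ih' ⊢
    simp [pvScanA, h1, ih']

lemma pv_map_id_of_not_mem (rest : List (String × List (String × Int))) (tipo : String)
    (x : String × Int) (h : ∀ q ∈ rest, q.1 ≠ tipo) :
    rest.map (fun p => if p.1 == tipo then (p.1, p.2 ++ [x]) else p) = rest := by
  induction rest with
  | nil => rfl
  | cons p rest ih =>
    have h1 : (p.1 == tipo) = false := by
      simp only [beq_eq_false_iff_ne]; exact h p (by simp)
    simp only [List.map_cons, h1, Bool.false_eq_true, if_false]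
    rw [ih (fun q hq => h q (List.mem_cons_of_mem _ hq))]

lemma pvScanA_found (seen : List (String × List (String × Int)))
    (prov tipo : String) (cant : Int)
    (nk : (seen.map (fun p => p.1)).Nodup) (hne : ∀ p ∈ seen, p.2 ≠ [])
    (h : tipo ∈ seen.map (fun p => p.1)) :
    pvScanA (pvOut seen) prov tipo cant
      = (pvOut (seen.map (fun p => if p.1 == tipo then (p.1, p.2 ++ [(prov, cant)]) else p)), true) := by
  induction seen with
  | nil => simp at h
  | cons p rest ih =>
    obtain ⟨k0, g⟩ := p
    simp only [List.map_cons, List.nodup_cons] at nk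
    by_cases hp : k0 = tipo
    · subst hp
      have hb : (k0 == k0) = true := by simp
      have hrest : ∀ q ∈ rest, q.1 ≠ k0 := by
        intro q hq e
        exact nk.1 (e ▸ List.mem_map_of_mem hq)
      obtain ⟨x, t, hxt⟩ := List.exists_cons_of_ne_nil (hne (k0, g) (by simp))
      subst hxt
      simp only [pvOut, List.map_cons, hb, if_true]
      rw [pv_map_id_of_not_mem rest k0 (prov, cant) hrest]
      show pvScanA ((k0, (pvBest (x :: t)).1, (pvBest (x :: t)).2) :: _) prov k0 cant = _
      rw [pvScanA]
      simp only [hb, if_true, pvBest_append]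
      by_cases hc : cant > (pvBest (x :: t)).2
      · have hc' : (pvBest (x :: t)).2 < cant := hc
        simp [hc]
      · have hc' : ¬ (pvBest (x :: t)).2 < cant := hc
        simp [hc]
    · have hb : (k0 == tipo) = false := by simp [hp]
      have hmem : tipo ∈ rest.map (fun q => q.1) := by
        simp only [List.map_cons, List.mem_cons] at h
        rcases h with h | h
        · exact absurd h.symm hp
        · exact h
      have ih' := ih nk.2 (fun q hq => hne q (List.mem_cons_of_mem _ hq)) hmem
      simp only [pvOut, List.map_cons] at ih' ⊢
      simp [pvScanA, hb, ih']

lemma pv_map_fst_update (seen : List (String × List (String × Int))) (k : String) (x : String × Int) :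
    (seen.map (fun p => if p.1 == k then (p.1, p.2 ++ [x]) else p)).map (fun p => p.1)
      = seen.map (fun p => p.1) := by
  rw [List.map_map]
  refine List.map_congr_left (fun p _ => ?_)
  simp only [Function.comp]
  split <;> rfl

lemma pvAddG_keys (seen : List (String × List (String × Int))) (k : String) (x : String × Int)
    (nk : (seen.map (fun p => p.1)).Nodup) :
    ((pvAddG seen k x).map (fun p => p.1)).Nodup := by
  unfold pvAddG
  by_cases h : k ∈ seen.map (fun p => p.1)
  · rw [if_pos h, pv_map_fst_update]; exact nk
  · rw [if_neg h, List.map_append]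
    simp only [List.map_cons, List.map_nil]
    rw [List.nodup_append]
    refine ⟨nk, List.nodup_singleton _, ?_⟩
    intro a ha b hb
    have hbk : b = k := by simpa using hb
    subst hbk
    exact fun e => h (e ▸ ha)

lemma pvAddG_ne (seen : List (String × List (String × Int))) (k : String) (x : String × Int)
    (hne : ∀ p ∈ seen, p.2 ≠ []) : ∀ p ∈ pvAddG seen k x, p.2 ≠ [] := by
  unfold pvAddG
  by_cases h : k ∈ seen.map (fun p => p.1)
  · rw [if_pos h]
    intro p hp
    obtain ⟨q, hq, rfl⟩ := List.mem_map.mp hp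
    by_cases hb : q.1 == k
    · simp only [hb, if_true]
      simp
    · simp only [hb, Bool.false_eq_true, if_false]
      exact hne q hq
  · rw [if_neg h]
    intro p hp
    rcases List.mem_append.mp hp with hm | hm
    · exact hne p hm
    · simp only [List.mem_singleton] at hm
      simp [hm]

lemma pv_main (l : List (String × String × Int)) :
    ∀ (seen : List (String × List (String × Int))),
    (seen.map (fun p => p.1)).Nodup → (∀ p ∈ seen, p.2 ≠ []) →
    l.foldl
      (fun max_cantidades juguete =>
        let provincia := juguete.1
        let tipo_juguete := juguete.2.1
        let cantidad := juguete.2.2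
        let r := pvScanA max_cantidades provincia tipo_juguete cantidad
        if r.2 then r.1 else max_cantidades ++ [(tipo_juguete, provincia, cantidad)])
      (pvOut seen)
    = pvOut (l.foldl (fun s r => pvAddG s r.2.1 (r.1, r.2.2)) seen) := by
  induction l with
  | nil => intro seen _ _; rfl
  | cons j l ih =>
    intro seen nk hne
    simp only [List.foldl_cons]
    have step : (if (pvScanA (pvOut seen) j.1 j.2.1 j.2.2).2 = true
          then (pvScanA (pvOut seen) j.1 j.2.1 j.2.2).1
          else pvOut seen ++ [(j.2.1, j.1, j.2.2)])
        = pvOut (pvAddG seen j.2.1 (j.1, j.2.2)) := by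
      by_cases h : j.2.1 ∈ seen.map (fun p => p.1)
      · rw [pvScanA_found seen j.1 j.2.1 j.2.2 nk hne h]
        simp [pvAddG, h]
      · have h' : ∀ q ∈ seen, q.1 ≠ j.2.1 := by
          intro q hq e; exact h (e ▸ List.mem_map_of_mem hq)
        rw [pvScanA_not_found seen j.1 j.2.1 j.2.2 h']
        simp [pvAddG, h, pvOut, pvBest_single]
    rw [step]
    exact ih _ (pvAddG_keys seen _ _ nk) (pvAddG_ne seen _ _ hne)

-- one Dict.insert step of phase 1, as pvAddG on the items list
lemma pv_insert_step (d : PySem.Dict String (List (String × Int))) (k : String) (x : String × Int)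
    (nk : d.keys.Nodup) :
    (d.insert k (d.getD k [] ++ [x])).items = pvAddG d.items k x := by
  have hkeys : d.keys = d.items.map (fun p => p.1) := rfl
  by_cases h : k ∈ d.items.map (fun p => p.1)
  · have hc : d.contains k = true := by
      rw [PySem.Dict.contains_eq_decide_mem_keys, hkeys]; simpa using h
    rw [PySem.Dict.items_insert_of_contains d _ hc]
    rw [pvAddG, if_pos h]
    refine List.map_congr_left (fun p hp => ?_)
    by_cases hb : p.1 == k
    · have hk : p.1 = k := by simpa using hb
      have hg : d.getD k [] = p.2 := by
        have hp' : (k, p.2) ∈ d.items := by rw [← hk]; simpa using hp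
        exact PySem.Dict.getD_of_mem_items d hp' nk []
      simp [hg, hk]
    · simp [hb]
  · have hc : d.contains k = false := by
      rw [PySem.Dict.contains_eq_decide_mem_keys, hkeys]
      simpa using h
    rw [PySem.Dict.items_insert_of_not_contains d _ hc]
    rw [PySem.Dict.getD_of_not_contains d _ hc]
    rw [pvAddG, if_neg h, List.nil_append]

lemma pv_dict_bridge (l : List (String × String × Int)) :
    ∀ (d : PySem.Dict String (List (String × Int))), d.keys.Nodup →
    (l.foldl
      (fun grupos registro =>
        grupos.insert registro.2.1 (grupos.getD registro.2.1 [] ++ [(registro.1, registro.2.2)]))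
      d).items
    = l.foldl (fun s r => pvAddG s r.2.1 (r.1, r.2.2)) d.items := by
  induction l with
  | nil => intro d _; rfl
  | cons j l ih =>
    intro d nk
    simp only [List.foldl_cons]
    rw [← pv_insert_step d j.2.1 (j.1, j.2.2) nk]
    exact ih _ (PySem.Dict.nodup_keys_insert d j.2.1 _ nk)

lemma pv_alt_eq (existencias : List (String × String × Int)) :
    maxima_cantidad_por_juguete_sin_metodos_alt existencias = pvOut (pvGrupos existencias).items := by
  unfold maxima_cantidad_por_juguete_sin_metodos_alt pvOut
  rw [PySem.List.foldl_append_singleton_eq_map]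
  rfl

-- ===== VERDICT (by name: the statement is the Claim_ definition above) =====
theorem maxima_cantidad_por_juguete_sin_metodos_spec : Claim_equal_maxima_cantidad_por_juguete_sin_metodos := by
  intro existencias _
  unfold Spec_maxima_cantidad_por_juguete_sin_metodos
  rw [pv_alt_eq]
  unfold maxima_cantidad_por_juguete_sin_metodos pvGrupos
  rw [pv_dict_bridge existencias PySem.Dict.empty (by simp [PySem.Dict.keys_empty])]
  have h := pv_main existencias [] (by simp) (by simp)
  simpa [pvOut] using h
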